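-- pv_equiv track=rewrite | github.com/precice/systemtests | local_test.py | filter_for_most_specialized_tests
-- ===== SOURCE A (Python) =====
-- def determine_specialization(test):
--     """
--     The specialization degree of a test is simply determined, by counting the number of appended specializations.
--     Example:
--     test_bindings has specialization degree 1
--     test_bindings.Ubuntu1804 has specialization degree 2
--     """
--     return test.split('.').__len__()
--
-- def determine_test_name(test):
--     return test.split('.')[0]
--
-- def filter_for_most_specialized_tests(all_tests):
--     """
--     We only want to consider the most specialized test, if several tests are availabe. This function removes duplicate tests and filters for the most specialized version.
--     """
--     most_specialized_tests = {}
--     for test in all_tests: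
--         test_name = determine_test_name(test)
--         specialization_degree = determine_specialization(test)
--         if not test_name in most_specialized_tests:  # test has not been added to the dict so far
--             most_specialized_tests[test_name] = test
--         elif determine_specialization(most_specialized_tests[test_name]) < specialization_degree:  # test has already been added to the dict, but the currently evaluated test is more specialized
--             most_specialized_tests[test_name] = test
--     return most_specialized_tests
-- ===== SOURCE B (Python) =====
-- def determine_specialization(test):
--     return len(test.split('.'))
--
-- def determine_test_name(test):
--     return test.split('.')[0]
--
-- def filter_for_most_specialized_tests(all_tests):
--     """Group tests by base name, then pick each group's maximum-specialization test
--     (max is first-wins on ties, matching the original strict-< update)."""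
--     groups = {}
--     for test in all_tests:
--         groups.setdefault(determine_test_name(test), []).append(test)
--     return {name: max(tests, key=determine_specialization)
--             for name, tests in groups.items()}
-- ===== Notes on version B (the rewrite author's own statement) =====
-- stated objective: alternative
-- what changed: Replaces the single-pass conditional-overwrite dict with group-by-name (setdefault of lists) followed by a dict comprehension taking max(key=determine_specialization) per group; Python's first-wins max reproduces the strict-< tie behaviour and key order.
import Mathlib
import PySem

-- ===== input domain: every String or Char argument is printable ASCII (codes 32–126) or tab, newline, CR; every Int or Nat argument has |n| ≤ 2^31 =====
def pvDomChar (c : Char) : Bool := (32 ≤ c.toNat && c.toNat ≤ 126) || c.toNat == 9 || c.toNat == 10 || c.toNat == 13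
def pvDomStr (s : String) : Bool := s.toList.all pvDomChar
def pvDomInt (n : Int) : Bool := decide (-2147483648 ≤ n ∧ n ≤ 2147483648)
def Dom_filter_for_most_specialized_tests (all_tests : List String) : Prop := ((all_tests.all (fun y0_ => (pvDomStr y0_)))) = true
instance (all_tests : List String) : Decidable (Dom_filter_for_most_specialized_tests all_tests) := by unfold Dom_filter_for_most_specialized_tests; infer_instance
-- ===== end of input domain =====

-- B keeps the same return value but computes it by grouping tests per base name and taking
-- each group's first maximum-specialization element (an alternative decomposition, not faster).

-- ===== PORT A =====
-- test.split('.'): sep "." ≠ "" so split? is always some; the result is nonempty, so index [0] never raises.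
def determine_specialization (test : String) : Nat :=
  ((PySem.Str.split? test ".").getD []).length

def determine_test_name (test : String) : String :=
  PySem.List.pyGetD ((PySem.Str.split? test ".").getD []) 0 ""

-- the loop body of A, named so the proofs can speak about it
def pvStepA (most_specialized_tests : PySem.Dict String String) (test : String) :
    PySem.Dict String String :=
  let test_name := determine_test_name test
  let specialization_degree := determine_specialization test
  if ¬ (most_specialized_tests.contains test_name = true) then
    most_specialized_tests.insert test_name test
  else if determine_specialization (most_specialized_tests.getD test_name "") <
      specialization_degree then
    most_specialized_tests.insert test_name test
  else
    most_specialized_tests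

def filter_for_most_specialized_tests (all_tests : List String) : List (String × String) :=
  (all_tests.foldl pvStepA PySem.Dict.empty).items

-- ===== PORT B =====
-- groups.setdefault(name, []).append(test) mutates the stored list: net effect is modify name [] (· ++ [test])
def pvStepB (groups : PySem.Dict String (List String)) (test : String) :
    PySem.Dict String (List String) :=
  groups.modify (determine_test_name test) [] (fun ts => ts ++ [test])

def filter_for_most_specialized_tests_alt (all_tests : List String) : List (String × String) :=
  let groups := all_tests.foldl pvStepB PySem.Dict.empty
  -- the dict comprehension: groups' keys are already unique, so its items are this map in order
  groups.items.map (fun p => (p.1, (PySem.List.max? p.2 determine_specialization).getD ""))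

-- ===== PRECONDITION & SPEC =====
def Spec_filter_for_most_specialized_tests (all_tests : List String) (out : List (String × String)) : Prop := out = filter_for_most_specialized_tests_alt all_tests
instance (all_tests : List String) (out : List (String × String)) : Decidable (Spec_filter_for_most_specialized_tests all_tests out) := by unfold Spec_filter_for_most_specialized_tests; infer_instance

-- ===== CLAIM (what is proved, stated in full; the proofs are below) =====
def Claim_equal_filter_for_most_specialized_tests : Prop := ∀ (all_tests : List String), Dom_filter_for_most_specialized_tests all_tests → Spec_filter_for_most_specialized_tests all_tests (filter_for_most_specialized_tests all_tests)

-- ===== LEMMAS AND PROOFS =====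

-- B's per-group value
def pvBest (ts : List String) : String :=
  (PySem.List.max? ts determine_specialization).getD ""

-- the value-level image of B's groups dict: what A's dict should be at every moment
def pvF (g : PySem.Dict String (List String)) : PySem.Dict String String :=
  PySem.Dict.mk (g.items.map (fun p => (p.1, pvBest p.2)))

lemma pvF_contains (g : PySem.Dict String (List String)) (n : String) :
    (pvF g).contains n = g.contains n := by
  simp [pvF, PySem.Dict.contains, List.any_map, Function.comp_def]

lemma pvF_keys (g : PySem.Dict String (List String)) :
    (pvF g).keys = g.keys := by
  simp [pvF, PySem.Dict.keys, List.map_map, Function.comp]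

lemma max?_append_singleton {α κ : Type} [LT κ] [DecidableLT κ]
    (ts : List α) (t : α) (key : α → κ) :
    PySem.List.max? (ts ++ [t]) key =
      match PySem.List.max? ts key with
      | none => some t
      | some m => if key m < key t then some t else some m := by
  simp only [PySem.List.max?, List.foldl_append, List.foldl_cons, List.foldl_nil]
  rfl

lemma pvBest_append (ts : List String) (t : String) (m : String)
    (hm : PySem.List.max? ts determine_specialization = some m) :
    pvBest (ts ++ [t]) =
      if determine_specialization m < determine_specialization t then t else m := by
  simp [pvBest, max?_append_singleton, hm]
  split_ifs <;> rfl

lemma pvStep_comm (g : PySem.Dict String (List String)) (t : String)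
    (hnd : g.keys.Nodup) (hne : ∀ p ∈ g.items, p.2 ≠ []) :
    pvStepA (pvF g) t = pvF (pvStepB g t) := by
  set n := determine_test_name t with hn
  by_cases hc : g.contains n = true
  · -- the name is already grouped
    obtain ⟨ts, hts⟩ : ∃ ts, g.get? n = some ts := by
      have := PySem.Dict.contains_eq_isSome_get? (d := g) (k := n)
      rw [hc] at this
      exact Option.isSome_iff_exists.mp this.symm
    have hmem : (n, ts) ∈ g.items := PySem.Dict.mem_items_of_get?_eq_some g hts
    have hgetD : g.getD n [] = ts := PySem.Dict.getD_of_mem_items g hmem hnd []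
    have htsne : ts ≠ [] := hne _ hmem
    obtain ⟨m, hm⟩ : ∃ m, PySem.List.max? ts determine_specialization = some m := by
      rcases h : PySem.List.max? ts determine_specialization with _ | m
      · exact absurd ((PySem.List.max?_eq_none_iff ts determine_specialization).mp h) htsne
      · exact ⟨m, rfl⟩
    have hbm : pvBest ts = m := by simp [pvBest, hm]
    -- A's lookup sees the current best of the group
    have hFm : (pvF g).getD n "" = pvBest ts := by
      refine PySem.Dict.getD_of_mem_items (pvF g) ?_ ?_ ""
      · exact List.mem_map_of_mem (f := fun p => (p.1, pvBest p.2)) hmem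
      · rw [pvF_keys]; exact hnd
    have hFc : (pvF g).contains n = true := by rw [pvF_contains]; exact hc
    -- B's step rewrites the group's list in place
    have hB : pvStepB g t = g.insert n (ts ++ [t]) := by
      simp [pvStepB, PySem.Dict.modify, ← hn, hgetD]
    have hBitems : (pvF (pvStepB g t)).items =
        g.items.map (fun p => if p.1 == n then (n, pvBest (ts ++ [t])) else (p.1, pvBest p.2)) := by
      rw [hB]
      simp only [pvF, PySem.Dict.items_insert_of_contains g _ hc, List.map_map]
      refine List.map_congr_left fun p _ => ?_
      by_cases h : p.1 = n <;> simp [h]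
    rw [pvBest_append ts t m hm] at hBitems
    by_cases hlt : determine_specialization m < determine_specialization t
    · -- strictly more specialized: both sides overwrite the entry with t
      have hA : pvStepA (pvF g) t = (pvF g).insert n t := by
        simp [pvStepA, ← hn, hFc, hFm, hbm, hlt]
      apply PySem.Dict.ext
      rw [hA, hBitems, PySem.Dict.items_insert_of_contains _ _ hFc]
      simp only [pvF, List.map_map]
      refine List.map_congr_left fun p _ => ?_
      by_cases h : p.1 = n <;> simp [h, hlt]
    · -- not strictly more specialized: A keeps its dict, B's new best is the old one
      have hA : pvStepA (pvF g) t = pvF g := by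
        simp [pvStepA, ← hn, hFc, hFm, hbm, hlt]
      apply PySem.Dict.ext
      rw [hA, hBitems]
      simp only [pvF]
      refine (List.map_congr_left fun p hp => ?_).symm
      by_cases h : p.1 == n
      · have hp1 : p.1 = n := eq_of_beq h
        have hsome : g.get? p.1 = some p.2 := PySem.Dict.get?_of_mem_items g hp hnd
        rw [hp1, hts] at hsome
        have hpts : p.2 = ts := by injection hsome with hv; exact hv.symm
        simp [hp1, hpts, hbm, hlt]
      · simp [h]
  · -- fresh name: both sides append a new entry, with pvBest [t] = t
    have hFc : ¬ (pvF g).contains n = true := by rw [pvF_contains]; exact hc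
    have hc' : g.contains n = false := by simpa using hc
    have hB : pvStepB g t = g.insert n [t] := by
      simp [pvStepB, PySem.Dict.modify, ← hn, PySem.Dict.getD_of_not_contains g [] hc']
    apply PySem.Dict.ext
    have : (pvF g).contains n = false := by rw [pvF_contains]; exact hc'
    rw [show pvStepA (pvF g) t = (pvF g).insert n t by simp [pvStepA, ← hn, hFc], hB,
      PySem.Dict.items_insert_of_not_contains _ _ this]
    simp [pvF, PySem.Dict.items_insert_of_not_contains g _ hc', pvBest, PySem.List.max?]

lemma pvStepB_nodup (g : PySem.Dict String (List String)) (t : String)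
    (hnd : g.keys.Nodup) : (pvStepB g t).keys.Nodup := by
  simpa [pvStepB, PySem.Dict.modify] using
    PySem.Dict.nodup_keys_insert g (determine_test_name t) _ hnd

lemma pvStepB_nonempty (g : PySem.Dict String (List String)) (t : String)
    (hne : ∀ p ∈ g.items, p.2 ≠ []) : ∀ p ∈ (pvStepB g t).items, p.2 ≠ [] := by
  intro p hp
  rw [pvStepB, PySem.Dict.modify] at hp
  rcases (PySem.Dict.mem_items_insert _ _ _ _).mp hp with h | ⟨h, _⟩
  · subst h; simp
  · exact hne _ h

lemma pvFold_comm (l : List String) (g : PySem.Dict String (List String))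
    (hnd : g.keys.Nodup) (hne : ∀ p ∈ g.items, p.2 ≠ []) :
    l.foldl pvStepA (pvF g) = pvF (l.foldl pvStepB g) := by
  induction l generalizing g with
  | nil => rfl
  | cons t l ih =>
    simp only [List.foldl_cons]
    rw [pvStep_comm g t hnd hne]
    exact ih _ (pvStepB_nodup g t hnd) (pvStepB_nonempty g t hne)

-- ===== VERDICT (by name: the statement is the Claim_ definition above) =====
theorem filter_for_most_specialized_tests_spec : Claim_equal_filter_for_most_specialized_tests := by
  intro all_tests _
  show filter_for_most_specialized_tests all_tests = filter_for_most_specialized_tests_alt all_tests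
  have h0 : (PySem.Dict.empty : PySem.Dict String String) =
      pvF (PySem.Dict.empty : PySem.Dict String (List String)) := rfl
  rw [filter_for_most_specialized_tests, h0,
    pvFold_comm all_tests PySem.Dict.empty PySem.Dict.nodup_keys_empty (by simp [PySem.Dict.empty])]
  simp [filter_for_most_specialized_tests_alt, pvF, pvBest]
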